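-- pv_equiv track=rewrite | github.com/cyberbono3/amazon-oa-python | 5_substrings_sizek_with_distinct_chars.py | compute_unique_substrings
-- ===== SOURCE A (Python) =====
-- def compute_unique_substrings(s, k):
--     if not s or not k:
--         return []
--     start, dic, result = 0, {}, set()
--     for i, char in enumerate(s):
--         dic[char] = dic.get(char, 0) + 1
--         if i - start + 1 == k:
--             if len(dic) == k:
--                 result.add("".join(s[start:i+1]))
--             if dic[s[start]] > 1:
--                 dic[s[start]] -= 1
--             else:
--                 del dic[s[start]]
--             start += 1
--     return list(result)
-- ===== SOURCE B (Python) =====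
-- def compute_unique_substrings(s, k):
--     if not s or k <= 0:
--         return []
--     result = set()
--     for i in range(len(s) - k + 1):
--         window = s[i:i+k]
--         if len(set(window)) == k:
--             result.add(window)
--     return list(result)
-- ===== Notes on version B (the rewrite author's own statement) =====
-- stated objective: simpler
-- what changed: Replaced A's sliding window with a start pointer and an incrementally maintained character-count dict by a plain scan over all window starts that slices each window and tests distinctness with a fresh set; the pointer/add/decrement/delete bookkeeping disappears.
import Mathlib
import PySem

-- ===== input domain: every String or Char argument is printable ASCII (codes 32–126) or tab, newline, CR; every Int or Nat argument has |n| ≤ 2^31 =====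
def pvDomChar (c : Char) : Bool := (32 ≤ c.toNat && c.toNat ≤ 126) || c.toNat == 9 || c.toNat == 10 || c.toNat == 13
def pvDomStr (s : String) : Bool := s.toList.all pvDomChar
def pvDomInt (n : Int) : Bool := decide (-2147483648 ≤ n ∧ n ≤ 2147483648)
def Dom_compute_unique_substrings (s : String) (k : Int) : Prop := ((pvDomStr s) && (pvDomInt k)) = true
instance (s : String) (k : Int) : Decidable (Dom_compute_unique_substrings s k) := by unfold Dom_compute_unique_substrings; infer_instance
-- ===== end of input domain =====

-- B replaces A's sliding window with incremental character counts by a brute-force scan that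
-- re-tests each window's distinctness with a fresh set (simpler, not faster).
-- NOTE on output order: Python's `list(result)` iterates a set in hash order; both ports return the
-- set's elements in FIRST-INSERTION order (the PySem.Set convention), identical for A and B.

-- ===== PORT A =====
-- "".join(s[start:i+1]) of a str slice is that substring itself: ported as String.ofList of the slice.
-- dic[s[start]] is read with getD _ 0; the key is always present at that point in A's loop.
def pvStepA (k : Int) (l : List Char) (st : Int × PySem.Dict Char Int × PySem.Set String)
    (p : Int × Char) : Int × PySem.Dict Char Int × PySem.Set String :=
  let start := st.1
  let dic := (st.2.1).insert p.2 ((st.2.1).getD p.2 0 + 1)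
  let result := st.2.2
  if p.1 - start + 1 = k then
    let result := if (dic.size : Int) = k then
        PySem.Set.add result (String.ofList (PySem.List.slice l (some start) (some (p.1 + 1))))
      else result
    let sc := PySem.List.pyGetD l start ' '
    let dic := if dic.getD sc 0 > 1 then dic.insert sc (dic.getD sc 0 - 1) else dic.erase sc
    (start + 1, dic, result)
  else (start, dic, result)

def compute_unique_substrings (s : String) (k : Int) : List String :=
  if s.toList.length = 0 ∨ k = 0 then []
  else
    ((PySem.List.enumerate s.toList 0).foldl (pvStepA k s.toList)
      (0, PySem.Dict.empty, PySem.Set.empty)).2.2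

-- ===== PORT B =====
def pvStepB (k : Int) (l : List Char) (result : PySem.Set String) (i : Int) : PySem.Set String :=
  let window := PySem.List.slice l (some i) (some (i + k))
  if ((PySem.Set.ofList window).length : Int) = k then
    PySem.Set.add result (String.ofList window)
  else result

def compute_unique_substrings_alt (s : String) (k : Int) : List String :=
  if s.toList.length = 0 ∨ k ≤ 0 then []
  else
    (PySem.List.pyRange 0 ((s.toList.length : Int) - k + 1) 1).foldl
      (pvStepB k s.toList) PySem.Set.empty

-- ===== PRECONDITION & SPEC =====
def Spec_compute_unique_substrings (s : String) (k : Int) (out : List String) : Prop := out = compute_unique_substrings_alt s k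
instance (s : String) (k : Int) (out : List String) : Decidable (Spec_compute_unique_substrings s k out) := by unfold Spec_compute_unique_substrings; infer_instance

-- ===== CLAIM (what is proved, stated in full; the proofs are below) =====
def Claim_equal_compute_unique_substrings : Prop := ∀ (s : String) (k : Int), Dom_compute_unique_substrings s k → Spec_compute_unique_substrings s k (compute_unique_substrings s k)

-- ===== LEMMAS AND PROOFS =====

-- dic always holds exactly the character counts of the current window w
def pvInv (w : List Char) (d : PySem.Dict Char Int) : Prop :=
  d.keys.Nodup ∧ ∀ c, d.get? c = if c ∈ w then some ((w.count c : Int)) else none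

theorem pvFind?_filter_ne {ν : Type} (items : List (Char × ν)) (kk x : Char) :
    List.find? (fun p => p.1 == x) (List.filter (fun p => !(p.1 == kk)) items)
      = if x = kk then none else List.find? (fun p => p.1 == x) items := by
  induction items with
  | nil => simp
  | cons hd tl ih =>
    rw [List.filter_cons]
    by_cases hhd : hd.1 = kk
    · rw [if_neg (by simp [hhd]), ih]
      by_cases hx : x = kk
      · simp [hx]
      · rw [if_neg hx, if_neg hx, List.find?_cons_of_neg (by simp [hhd]; exact fun hh => hx hh.symm)]
    · rw [if_pos (by simp [hhd])]
      by_cases hdx : hd.1 = x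
      · have hxk : ¬ x = kk := by rw [← hdx]; exact hhd
        rw [List.find?_cons_of_pos (by simp [hdx]), if_neg hxk,
          List.find?_cons_of_pos (by simp [hdx])]
      · rw [List.find?_cons_of_neg (by simp [hdx]), ih]
        by_cases hx : x = kk
        · simp [hx]
        · rw [if_neg hx, if_neg hx, List.find?_cons_of_neg (by simp [hdx])]

theorem pvGet?_erase {ν : Type} (d : PySem.Dict Char ν) (kk x : Char) :
    (d.erase kk).get? x = if x = kk then none else d.get? x := by
  simp only [PySem.Dict.get?, PySem.Dict.erase, pvFind?_filter_ne]
  split <;> simp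

theorem pvNodup_keys_erase {ν : Type} (d : PySem.Dict Char ν) (kk : Char)
    (h : d.keys.Nodup) : (d.erase kk).keys.Nodup := by
  have hs : (d.erase kk).keys.Sublist d.keys := by
    simpa [PySem.Dict.keys, PySem.Dict.erase] using
      (List.Sublist.map (Prod.fst : Char × ν → Char) (List.filter_sublist (l := d.items)))
  exact hs.nodup h

theorem pvInv_getD (w : List Char) (d : PySem.Dict Char Int) (h : pvInv w d) (c : Char) :
    d.getD c 0 = (w.count c : Int) := by
  rcases h with ⟨-, h2⟩
  rw [PySem.Dict.getD_eq_get?_getD, h2 c]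
  by_cases hc : c ∈ w
  · simp [hc]
  · simp [hc, List.count_eq_zero_of_not_mem hc]

theorem pvInv_size (w : List Char) (d : PySem.Dict Char Int) (h : pvInv w d) :
    d.size = (PySem.Set.ofList w).length := by
  rcases h with ⟨h1, h2⟩
  have hmem : ∀ c, c ∈ d.keys ↔ c ∈ w := by
    intro c
    rw [← not_iff_not, ← PySem.Dict.get?_eq_none_iff_not_mem_keys, h2 c]
    by_cases hc : c ∈ w <;> simp [hc]
  have hperm : d.keys.Perm (PySem.Set.ofList w) := by
    rw [List.perm_ext_iff_of_nodup h1 (PySem.Set.nodup_ofList w)]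
    intro c; rw [hmem c, PySem.Set.mem_ofList]
  have hlen : d.keys.length = (PySem.Set.ofList w).length := hperm.length_eq
  simpa [PySem.Dict.keys, PySem.Dict.size] using hlen

theorem pvInv_insert (w : List Char) (d : PySem.Dict Char Int) (c : Char) (h : pvInv w d) :
    pvInv (w ++ [c]) (d.insert c (d.getD c 0 + 1)) := by
  constructor
  · exact PySem.Dict.nodup_keys_insert d c _ h.1
  · intro x
    rw [PySem.Dict.get?_insert]
    by_cases hx : x = c
    · subst hx
      simp [pvInv_getD w d h x]
    · rw [if_neg hx, h.2 x]
      have hmem : x ∈ w ++ [c] ↔ x ∈ w := by simp [hx]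
      have hc0 : List.count x [c] = 0 := List.count_eq_zero.mpr (by simp [hx])
      simp [hmem, List.count_append, hc0]

theorem pvInv_pop (c0 : Char) (t : List Char) (d : PySem.Dict Char Int)
    (h : pvInv (c0 :: t) d) :
    pvInv t (if d.getD c0 0 > 1 then d.insert c0 (d.getD c0 0 - 1) else d.erase c0) := by
  have hc0 : d.getD c0 0 = ((t.count c0 : Int) + 1) := by
    rw [pvInv_getD _ _ h c0]; simp
  by_cases hgt : d.getD c0 0 > 1
  · have hmemt : c0 ∈ t := by
      rw [hc0] at hgt
      have : 0 < t.count c0 := by exact_mod_cast (by omega : (0:Int) < (t.count c0 : Int))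
      exact List.count_pos_iff.mp this
    rw [if_pos hgt]
    constructor
    · exact PySem.Dict.nodup_keys_insert d c0 _ h.1
    · intro x
      rw [PySem.Dict.get?_insert]
      by_cases hx : x = c0
      · subst hx; rw [if_pos rfl, hc0]; simp [hmemt]
      · rw [if_neg hx, h.2 x]
        have hmem : x ∈ c0 :: t ↔ x ∈ t := by simp [hx]
        simp [hmem, show ¬ c0 = x from fun hh => hx hh.symm]
  · have hnot : c0 ∉ t := by
      rw [hc0] at hgt
      intro hmem
      have : 0 < t.count c0 := List.count_pos_iff.mpr hmem
      omega
    rw [if_neg hgt]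
    constructor
    · exact pvNodup_keys_erase d c0 h.1
    · intro x
      rw [pvGet?_erase]
      by_cases hx : x = c0
      · subst hx; simp [hnot]
      · rw [if_neg hx, h.2 x]
        have hmem : x ∈ c0 :: t ↔ x ∈ t := by simp [hx]
        simp [hmem, show ¬ c0 = x from fun hh => hx hh.symm]

-- main loop correspondence for k ≥ 1
theorem pvMain (k : Int) (hk : 1 ≤ k) (l : List Char) :
    ∀ (rest : List Char) (m : Nat) (d : PySem.Dict Char Int) (res : PySem.Set String),
      m + rest.length = l.length →
      l.drop m = rest →
      pvInv ((l.drop (m + 1 - k.toNat)).take (m - (m + 1 - k.toNat))) d →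
      ((PySem.List.enumerate rest (m : Int)).foldl (pvStepA k l)
          (((m + 1 - k.toNat : Nat) : Int), d, res)).2.2
        = (PySem.List.pyRange ((m + 1 - k.toNat : Nat) : Int) ((l.length : Int) - k + 1) 1).foldl
            (pvStepB k l) res := by
  intro rest
  induction rest with
  | nil =>
    intro m d res hlen hdrop hinv
    have : PySem.List.pyRange ((m + 1 - k.toNat : Nat) : Int) ((l.length : Int) - k + 1) 1 = [] := by
      apply PySem.List.pyRange_one_eq_nil
      simp at hlen
      omega
    simp [PySem.List.enumerate, this]
  | cons r rest ih =>
    intro m d res hlen hdrop hinv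
    have hm : m < l.length := by simp at hlen; omega
    have hcons : r :: rest = l[m] :: l.drop (m + 1) :=
      hdrop.symm.trans (List.drop_eq_getElem_cons hm)
    rw [List.cons.injEq] at hcons
    have hr : l[m] = r := hcons.1.symm
    have hdrop2 : l.drop (m + 1) = rest := hcons.2.symm
    have hkN : 1 ≤ k.toNat := by omega
    have hw' : (l.drop (m + 1 - k.toNat)).take (m + 1 - (m + 1 - k.toNat))
        = (l.drop (m + 1 - k.toNat)).take (m - (m + 1 - k.toNat)) ++ [r] := by
      have h1 : m + 1 - (m + 1 - k.toNat) = (m - (m + 1 - k.toNat)) + 1 := by omega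
      have h2 : (m + 1 - k.toNat) + (m - (m + 1 - k.toNat)) = m := by omega
      rw [h1, List.take_add_one, List.getElem?_drop, h2, List.getElem?_eq_getElem hm, hr]
      simp
    have hinv' : pvInv ((l.drop (m + 1 - k.toNat)).take (m + 1 - (m + 1 - k.toNat)))
        (d.insert r (d.getD r 0 + 1)) := by
      rw [hw']; exact pvInv_insert _ d r hinv
    rw [PySem.List.enumerate_cons, List.foldl_cons]
    by_cases htrig : k.toNat ≤ m + 1
    · -- the window has reached size k: A fires its condition, B consumes index m+1-k
      have halt : m + 1 - k.toNat < l.length := by omega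
      have hcond : (m : Int) - ((m + 1 - k.toNat : Nat) : Int) + 1 = k := by omega
      simp only [pvStepA, hcond, if_true]
      have hget : PySem.List.pyGetD l ((m + 1 - k.toNat : Nat) : Int) ' ' = l[m + 1 - k.toNat] := by
        rw [PySem.List.pyGetD_eq_getElem l ' ' (by omega) (by exact_mod_cast halt)]
        simp
      rw [hget]
      have hsliceA : PySem.List.slice l (some ((m + 1 - k.toNat : Nat) : Int)) (some ((m : Int) + 1))
          = (l.drop (m + 1 - k.toNat)).take (m + 1 - (m + 1 - k.toNat)) := by
        have hb2 : ((m : Int) + 1)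
            = (((m + 1 - k.toNat) : Nat) : Int) + (((m + 1 - (m + 1 - k.toNat)) : Nat) : Int) := by
          omega
        rw [hb2, PySem.List.slice_natCast_add]
      have hsz : (((d.insert r (d.getD r 0 + 1)).size : Nat) : Int)
          = ((PySem.Set.ofList ((l.drop (m + 1 - k.toNat)).take (m + 1 - (m + 1 - k.toNat)))).length : Int) := by
        rw [pvInv_size _ _ hinv']
      have hsplit : (l.drop (m + 1 - k.toNat)).take (m + 1 - (m + 1 - k.toNat))
          = l[m + 1 - k.toNat] :: (l.drop (m + 1 - k.toNat + 1)).take (m + 1 - (m + 1 - k.toNat) - 1) := by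
        rw [List.drop_eq_getElem_cons halt]
        have h3 : m + 1 - (m + 1 - k.toNat) = (m + 1 - (m + 1 - k.toNat) - 1) + 1 := by omega
        conv_lhs => rw [h3]
        rw [List.take_succ_cons]
      have hinv2 := pvInv_pop (l[m + 1 - k.toNat])
        ((l.drop (m + 1 - k.toNat + 1)).take (m + 1 - (m + 1 - k.toNat) - 1))
        (d.insert r (d.getD r 0 + 1)) (hsplit ▸ hinv')
      rw [PySem.List.pyRange_one_cons
        (show ((m + 1 - k.toNat : Nat) : Int) < (l.length : Int) - k + 1 by
          simp at hlen; omega), List.foldl_cons]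
      simp only [pvStepB]
      have hb : ((m + 1 - k.toNat : Nat) : Int) + k = (m : Int) + 1 := by omega
      rw [hb, hsliceA, hsz]
      have e1 : (m : Int) + 1 = ((m + 1 : Nat) : Int) := by omega
      have e2 : ((m + 1 - k.toNat : Nat) : Int) + 1 = ((m + 1 + 1 - k.toNat : Nat) : Int) := by omega
      rw [e1, e2]
      exact ih (m + 1) _ _ (by simp at hlen ⊢; omega) hdrop2 (by
        have e3 : m + 1 + 1 - k.toNat = m + 1 - k.toNat + 1 := by omega
        have e4 : m + 1 - (m + 1 + 1 - k.toNat) = m + 1 - (m + 1 - k.toNat) - 1 := by omega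
        rw [e4, e3]; exact hinv2)
    · -- window still shorter than k: A only extends the count dict
      have hcond : ¬ ((m : Int) - ((m + 1 - k.toNat : Nat) : Int) + 1 = k) := by omega
      simp only [pvStepA, hcond, if_false]
      have e1 : ((m : Int) + 1) = ((m + 1 : Nat) : Int) := by omega
      have e2 : m + 1 - k.toNat = m + 1 + 1 - k.toNat := by omega
      rw [e1, e2]
      exact ih (m + 1) _ res (by simp at hlen ⊢; omega) hdrop2 (by rw [← e2]; exact hinv')

-- k < 0: A's window condition i - start + 1 == k never fires (start stays 0, i ≥ 0)
theorem pvNegA (k : Int) (hk : k < 0) (l : List Char) :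
    ∀ (rest : List Char) (i : Int) (d : PySem.Dict Char Int) (res : PySem.Set String),
      0 ≤ i →
      ((PySem.List.enumerate rest i).foldl (pvStepA k l) (0, d, res)).2.2 = res := by
  intro rest
  induction rest with
  | nil => intro i d res hi; simp [PySem.List.enumerate]
  | cons r rest ih =>
    intro i d res hi
    rw [PySem.List.enumerate_cons, List.foldl_cons]
    have hcond : ¬ (i - 0 + 1 = k) := by omega
    simp only [pvStepA, hcond, if_false]
    exact ih (i + 1) _ res (by omega)

-- ===== VERDICT (by name: the statement is the Claim_ definition above) =====
theorem compute_unique_substrings_spec : Claim_equal_compute_unique_substrings := by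
  intro s k _
  unfold Spec_compute_unique_substrings compute_unique_substrings compute_unique_substrings_alt
  by_cases hs : s.toList.length = 0
  · rw [if_pos (Or.inl hs), if_pos (Or.inl hs)]
  · by_cases hk0 : k = 0
    · rw [if_pos (Or.inr hk0), if_pos (Or.inr (by omega))]
    · by_cases hneg : k < 0
      · rw [if_neg (by simp [hk0]; simpa using hs), if_pos (Or.inr (by omega))]
        exact pvNegA k hneg s.toList s.toList 0 PySem.Dict.empty PySem.Set.empty le_rfl
      · have hk : 1 ≤ k := by omega
        rw [if_neg (by simp [hk0]; simpa using hs),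
          if_neg (by simp; exact ⟨by simpa using hs, by omega⟩)]
        have h0 : ((0 + 1 - k.toNat : Nat) : Int) = 0 := by omega
        have := pvMain k hk s.toList s.toList 0 PySem.Dict.empty PySem.Set.empty
          (by simp) (by simp) (by
            constructor
            · simp [PySem.Dict.keys, PySem.Dict.empty]
            · intro c
              have : (0 : Nat) - (0 + 1 - k.toNat) = 0 := by omega
              simp [this, PySem.Dict.get?_empty])
        rw [h0] at this
        exact this.symm ▸ rfl
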